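-- pv_equiv track=rewrite | github.com/maxftl/budget_auction | auction.py | getRestrictedDemandSet
-- ===== SOURCE A (Python) =====
-- DUMMY_ITEM = -1
--
-- def getRestrictedDemandSet(valuation, price, budget, permited):
--     utilities = [v-p if p <= budget and i in permited else -1 for i,(v,p) in enumerate(zip(valuation,price))]
--     max_utility = max(utilities) if len(utilities) > 0 else 0
--     if max_utility < 0:
--         return set([DUMMY_ITEM])
--     demand_set = {i for i, u in enumerate(utilities) if u == max_utility}
--     if max_utility == 0:
--         demand_set.add(DUMMY_ITEM)
--     return demand_set
-- ===== SOURCE B (Python) =====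
-- DUMMY_ITEM = -1
--
-- def getRestrictedDemandSet(valuation, price, budget, permited):
--     best_utility = None
--     best_indices = set()
--     for i, (v, p) in enumerate(zip(valuation, price)):
--         u = v - p if p <= budget and i in permited else -1
--         if best_utility is None or u > best_utility:
--             best_utility = u
--             best_indices = {i}
--         elif u == best_utility:
--             best_indices.add(i)
--     max_utility = best_utility if best_utility is not None else 0
--     if max_utility < 0:
--         return {DUMMY_ITEM}
--     if max_utility == 0:
--         best_indices.add(DUMMY_ITEM)
--     return best_indices
-- ===== Notes on version B (the rewrite author's own statement) =====
-- stated objective: alternative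
-- what changed: Replaced A's three passes (build the full utilities list, take max() over it, then filter-enumerate it again for the argmax set) by one fused pass over enumerate(zip(valuation, price)) that maintains the running best utility and its argmax index set, applying the dummy-item tail afterwards.
import Mathlib
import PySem

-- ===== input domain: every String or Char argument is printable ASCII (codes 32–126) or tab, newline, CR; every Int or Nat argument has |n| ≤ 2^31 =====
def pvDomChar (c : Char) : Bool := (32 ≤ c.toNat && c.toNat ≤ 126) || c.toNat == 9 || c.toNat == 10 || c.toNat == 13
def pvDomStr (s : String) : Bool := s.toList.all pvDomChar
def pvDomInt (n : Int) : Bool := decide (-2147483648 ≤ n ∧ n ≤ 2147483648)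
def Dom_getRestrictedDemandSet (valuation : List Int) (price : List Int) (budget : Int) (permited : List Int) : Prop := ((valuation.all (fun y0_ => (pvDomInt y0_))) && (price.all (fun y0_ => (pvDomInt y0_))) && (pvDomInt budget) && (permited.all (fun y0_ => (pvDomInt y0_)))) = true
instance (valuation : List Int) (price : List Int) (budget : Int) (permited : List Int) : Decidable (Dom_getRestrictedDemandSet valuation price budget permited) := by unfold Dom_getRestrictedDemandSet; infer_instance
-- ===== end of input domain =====

-- ===== PORT A =====
-- One line: B replaces A's build-utilities-list / max() / filter passes by a single fused pass
-- tracking the running best utility and its index set (objective: alternative, one pass instead of three).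
def getRestrictedDemandSet (valuation : List Int) (price : List Int) (budget : Int) (permited : List Int) : List Int :=
  let utilities : List Int :=
    (PySem.List.enumerate (valuation.zip price)).map
      (fun e => if e.2.2 ≤ budget ∧ e.1 ∈ permited then e.2.1 - e.2.2 else -1)
  let maxUtility : Int :=
    if utilities.length > 0 then (PySem.List.max? utilities (fun u => u)).getD 0 else 0
  if maxUtility < 0 then PySem.Set.ofList [(-1 : Int)]
  else
    let demandSet : PySem.Set Int :=
      PySem.Set.ofList (((PySem.List.enumerate utilities).filter (fun e => e.2 = maxUtility)).map (fun e => e.1))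
    if maxUtility = 0 then PySem.Set.add demandSet (-1) else demandSet

-- ===== PORT B =====
def pvAltLoop (budget : Int) (permited : List Int) :
    List (Int × Int × Int) → Option Int × PySem.Set Int → Option Int × PySem.Set Int
  | [], s => s
  | (i, v, p) :: rest, (best, idxs) =>
    let u : Int := if p ≤ budget ∧ i ∈ permited then v - p else -1
    match best with
    | none => pvAltLoop budget permited rest (some u, [i])
    | some b =>
      if u > b then pvAltLoop budget permited rest (some u, [i])
      else if u = b then pvAltLoop budget permited rest (some b, PySem.Set.add idxs i)
      else pvAltLoop budget permited rest (some b, idxs)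

def getRestrictedDemandSet_alt (valuation : List Int) (price : List Int) (budget : Int) (permited : List Int) : List Int :=
  let r := pvAltLoop budget permited (PySem.List.enumerate (valuation.zip price)) (none, PySem.Set.empty)
  let maxUtility : Int := r.1.getD 0
  if maxUtility < 0 then [(-1 : Int)]
  else if maxUtility = 0 then PySem.Set.add r.2 (-1)
  else r.2

-- ===== PRECONDITION & SPEC =====
def Spec_getRestrictedDemandSet (valuation : List Int) (price : List Int) (budget : Int) (permited : List Int) (out : List Int) : Prop := out = getRestrictedDemandSet_alt valuation price budget permited
instance (valuation : List Int) (price : List Int) (budget : Int) (permited : List Int) (out : List Int) : Decidable (Spec_getRestrictedDemandSet valuation price budget permited out) := by unfold Spec_getRestrictedDemandSet; infer_instance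

-- ===== CLAIM (what is proved, stated in full; the proofs are below) =====
def Claim_equal_getRestrictedDemandSet : Prop := ∀ (valuation : List Int) (price : List Int) (budget : Int) (permited : List Int), Dom_getRestrictedDemandSet valuation price budget permited → Spec_getRestrictedDemandSet valuation price budget permited (getRestrictedDemandSet valuation price budget permited)

-- ===== LEMMAS AND PROOFS =====

def pvUtil (budget : Int) (permited : List Int) (e : Int × Int × Int) : Int :=
  if e.2.2 ≤ budget ∧ e.1 ∈ permited then e.2.1 - e.2.2 else -1

theorem pvEnumerate_map_enumerate {α β : Type} (g : Int × α → β) (xs : List α) :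
    ∀ (s : Int),
    PySem.List.enumerate ((PySem.List.enumerate xs s).map g) s
      = (PySem.List.enumerate xs s).map (fun e => (e.1, g e)) := by
  induction xs with
  | nil => intro s; simp
  | cons x xs ih => intro s; simp [PySem.List.enumerate_cons, ih]

-- the fused loop computes the running maximum and the (in-order) list of its argmax indices
theorem pvAltLoop_some (budget : Int) (permited : List Int) :
    ∀ (ps : List (Int × Int × Int)) (b : Int) (idxs : List Int),
    (idxs ++ ps.map (fun e => e.1)).Nodup →
    pvAltLoop budget permited ps (some b, idxs) =
      (some ((ps.map (pvUtil budget permited)).foldl max b),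
        (if b = (ps.map (pvUtil budget permited)).foldl max b then idxs else []) ++
          (ps.filter (fun e => pvUtil budget permited e = (ps.map (pvUtil budget permited)).foldl max b)).map (fun e => e.1)) := by
  intro ps
  induction ps with
  | nil => intro b idxs _; simp [pvAltLoop]
  | cons hd tl ih =>
    obtain ⟨i, v, p⟩ := hd
    intro b idxs h
    have hlist : idxs ++ ((i, v, p) :: tl).map (fun e => e.1) = idxs ++ i :: tl.map (fun e => e.1) := by simp
    rw [hlist] at h
    have hu : (if p ≤ budget ∧ i ∈ permited then v - p else -1) = pvUtil budget permited (i, v, p) := rfl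
    have hmax : (((i, v, p) :: tl).map (pvUtil budget permited)).foldl max b
        = (tl.map (pvUtil budget permited)).foldl max (max b (pvUtil budget permited (i, v, p))) := by
      simp [List.foldl_cons]
    have hle : max b (pvUtil budget permited (i, v, p))
        ≤ (tl.map (pvUtil budget permited)).foldl max (max b (pvUtil budget permited (i, v, p))) :=
      (PySem.List.le_foldl_max _ _).1
    set u := pvUtil budget permited (i, v, p) with hudef
    set M := (tl.map (pvUtil budget permited)).foldl max (max b u) with hM
    rw [hmax]
    by_cases hgt : u > b
    · have hmaxbu : max b u = u := by omega
      rw [hmaxbu] at hM hle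
      have h2 : ([i] ++ tl.map (fun e => e.1)).Nodup := by
        simpa using h.of_append_right
      have hrec := ih u [i] h2
      rw [← hM] at hrec
      simp only [pvAltLoop, hu]
      rw [if_pos hgt, hrec]
      have hbne : ¬ b = M := by omega
      rw [if_neg hbne]
      simp only [List.filter_cons, List.nil_append]
      by_cases he : u = M
      · rw [if_pos he]
        simp [← hudef, he]
      · rw [if_neg he]
        simp [← hudef, he]
    · by_cases heq : u = b
      · have hmaxbu : max b u = b := by omega
        rw [hmaxbu] at hM hle
        have hnotmem : i ∉ idxs := fun hc => (List.disjoint_of_nodup_append h) hc (by simp)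
        have hadd : PySem.Set.add idxs i = idxs ++ [i] := by
          simp [PySem.Set.add, hnotmem]
        have h2 : ((idxs ++ [i]) ++ tl.map (fun e => e.1)).Nodup := by
          simpa [List.append_assoc] using h
        have hrec := ih b (idxs ++ [i]) h2
        rw [← hM] at hrec
        simp only [pvAltLoop, hu]
        rw [if_neg hgt, if_pos heq, hadd, hrec]
        simp only [List.filter_cons]
        by_cases hbM : b = M
        · rw [if_pos hbM, if_pos hbM]
          have huM : u = M := heq.trans hbM
          simp [← hudef, huM, List.append_assoc]
        · rw [if_neg hbM, if_neg hbM]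
          have huM : ¬ u = M := fun hc => hbM (heq ▸ hc)
          simp [← hudef, huM]
      · have hlt : u < b := by omega
        have hmaxbu : max b u = b := by omega
        rw [hmaxbu] at hM hle
        have h2 : (idxs ++ tl.map (fun e => e.1)).Nodup :=
          ((List.sublist_cons_self i (tl.map (fun e => e.1))).append_left idxs).nodup h
        have hrec := ih b idxs h2
        rw [← hM] at hrec
        simp only [pvAltLoop, hu]
        rw [if_neg hgt, if_neg heq, hrec]
        simp only [List.filter_cons]
        have huM : ¬ u = M := by omega
        simp [← hudef, huM]

theorem pvMain (valuation : List Int) (price : List Int) (budget : Int) (permited : List Int) :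
    getRestrictedDemandSet valuation price budget permited
      = getRestrictedDemandSet_alt valuation price budget permited := by
  rcases hz : valuation.zip price with _ | ⟨⟨v, p⟩, ztl⟩
  · simp [getRestrictedDemandSet, getRestrictedDemandSet_alt, hz, pvAltLoop]
  · have hfun : (fun (e : Int × Int × Int) => if e.2.2 ≤ budget ∧ e.1 ∈ permited then e.2.1 - e.2.2 else -1)
        = pvUtil budget permited := rfl
    have hnd1 : ((PySem.List.enumerate ztl 1).map (fun e => e.1)).Nodup := by
      have hp : ((PySem.List.enumerate ztl 1).map (fun e => e.1)).Pairwise (· < ·) :=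
        (PySem.List.pairwise_lt_enumerate ztl 1).map _ (fun a b hab => hab)
      exact hp.imp (fun hab => ne_of_lt hab)
    have h0 : (0 : Int) ∉ (PySem.List.enumerate ztl 1).map (fun e => e.1) := by
      intro hmem
      rcases List.mem_map.mp hmem with ⟨e, he, hfst⟩
      rcases (PySem.List.mem_enumerate_iff ztl 1 e).mp he with ⟨k, hk, rfl⟩
      simp at hfst
      omega
    have hnodup0 : ([(0 : Int)] ++ (PySem.List.enumerate ztl 1).map (fun e => e.1)).Nodup := by
      simp only [List.singleton_append, List.nodup_cons]
      exact ⟨h0, hnd1⟩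
    have hloop := pvAltLoop_some budget permited (PySem.List.enumerate ztl 1)
      (pvUtil budget permited (0, v, p)) [0] hnodup0
    have hstep : pvAltLoop budget permited ((0, (v, p)) :: PySem.List.enumerate ztl 1)
        (none, PySem.Set.empty)
        = pvAltLoop budget permited (PySem.List.enumerate ztl 1)
            (some (pvUtil budget permited (0, v, p)), [0]) := rfl
    have hps : PySem.List.enumerate ((v, p) :: ztl) 0 = (0, (v, p)) :: PySem.List.enumerate ztl 1 := by
      rw [PySem.List.enumerate_cons]
      norm_num
    set f := pvUtil budget permited with hfdef
    set u0 := f (0, v, p) with hu0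
    set M := ((PySem.List.enumerate ztl 1).map f).foldl max u0 with hMdef
    set I := (if u0 = M then [(0 : Int)] else []) ++
      ((PySem.List.enumerate ztl 1).filter (fun e => f e = M)).map (fun e => e.1) with hIdef
    -- A's filtered index list equals the fused loop's index list I
    have hAidx : ((PySem.List.enumerate (f (0, v, p) :: (PySem.List.enumerate ztl 1).map f) 0).filter
          (fun e => e.2 = M)).map (fun e => e.1) = I := by
      rw [← List.map_cons, ← hps, pvEnumerate_map_enumerate, hps, List.filter_map, List.map_map]
      simp only [Function.comp_def]
      rw [List.filter_cons]
      by_cases he : u0 = M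
      · simp [hIdef, ← hu0, he]
      · simp [hIdef, ← hu0, he]
    have hsubtl : List.Sublist
        ((((PySem.List.enumerate ztl 1).filter (fun e => decide (f e = M))).map (fun e => e.1)))
        ((PySem.List.enumerate ztl 1).map (fun e => e.1)) :=
      (List.filter_sublist).map _
    have htlnd := hsubtl.nodup hnd1
    have htl0 : (0 : Int) ∉ (((PySem.List.enumerate ztl 1).filter (fun e => decide (f e = M))).map (fun e => e.1)) :=
      fun hmem => h0 (hsubtl.subset hmem)
    have hInodup : I.Nodup := by
      by_cases he : u0 = M
      · rw [hIdef, if_pos he]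
        simp only [List.singleton_append, List.nodup_cons]
        exact ⟨htl0, htlnd⟩
      · rw [hIdef, if_neg he]
        simpa using htlnd
    have hofI : PySem.Set.ofList I = I := PySem.Set.ofList_eq_self_of_nodup I hInodup
    have hlen : (f (0, v, p) :: (PySem.List.enumerate ztl 1).map f).length > 0 := by simp
    simp only [getRestrictedDemandSet, getRestrictedDemandSet_alt, hz, hfun]
    rw [hps, hstep, hloop, List.map_cons]
    rw [if_pos hlen, PySem.List.max?_id_cons]
    simp only [Option.getD_some, ← hu0, ← hMdef]
    rw [hAidx, hofI]
    split_ifs with h1 h2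
    · decide
    · rfl
    · rfl
-- ===== VERDICT (by name: the statement is the Claim_ definition above) =====
theorem getRestrictedDemandSet_spec : Claim_equal_getRestrictedDemandSet := by
  intro valuation price budget permited _
  exact pvMain valuation price budget permited
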